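-- pv_equiv track=rewrite | github.com/jasminesayyad29/EaseAccess-Gesture-Voice-Control | src/_main_/voice_Controller_omega.py | _app_alias_terms
-- ===== SOURCE A (Python) =====
-- APP_ALIAS_GROUPS = {
--     "chrome": ["chrome", "google chrome", "chrome.exe"],
--     "word": ["word", "microsoft word", "winword", "winword.exe"],
--     "powerpoint": ["powerpoint", "microsoft powerpoint", "power point", "powerpnt", "powerpnt.exe"],
--     "excel": ["excel", "microsoft excel", "excel.exe"],
-- }
--
-- def _app_alias_terms(query):
--     terms = [query]
--     for canonical, aliases in APP_ALIAS_GROUPS.items():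
--         if query == canonical or query in aliases:
--             terms.extend(aliases)
--             terms.append(canonical)
--             break
--     unique_terms = []
--     for t in terms:
--         t = t.strip().lower()
--         if t and t not in unique_terms:
--             unique_terms.append(t)
--     return unique_terms
-- ===== SOURCE B (Python) =====
-- APP_ALIAS_GROUPS = {
--     "chrome": ["chrome", "google chrome", "chrome.exe"],
--     "word": ["word", "microsoft word", "winword", "winword.exe"],
--     "powerpoint": ["powerpoint", "microsoft powerpoint", "power point", "powerpnt", "powerpnt.exe"],
--     "excel": ["excel", "microsoft excel", "excel.exe"],
-- }
--
-- # Fully precomputed answer table, built once at import time: for every exact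
-- # alias/canonical string the FINAL result list (query first, then the group's
-- # aliases and canonical, deduplicated).  The table entries need no runtime
-- # normalization because every alias constant is already stripped, lowercase
-- # and non-empty.
-- _ANSWER = {
--     term: list(dict.fromkeys([term] + aliases + [canonical]))
--     for canonical, aliases in APP_ALIAS_GROUPS.items()
--     for term in aliases + [canonical]
-- }
--
-- def _app_alias_terms(query):
--     hit = _ANSWER.get(query)
--     if hit is not None:
--         return list(hit)
--     q = query.strip().lower()
--     return [q] if q else []
-- ===== Notes on version B (the rewrite author's own statement) =====
-- stated objective: alternative
-- what changed: B precomputes at module level the complete final answer list for every alias/canonical key, so the function is a single table lookup with no group scan and no normalize/dedup loop at call time; unmatched queries are handled by a direct strip/lower of the query alone.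
import Mathlib
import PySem

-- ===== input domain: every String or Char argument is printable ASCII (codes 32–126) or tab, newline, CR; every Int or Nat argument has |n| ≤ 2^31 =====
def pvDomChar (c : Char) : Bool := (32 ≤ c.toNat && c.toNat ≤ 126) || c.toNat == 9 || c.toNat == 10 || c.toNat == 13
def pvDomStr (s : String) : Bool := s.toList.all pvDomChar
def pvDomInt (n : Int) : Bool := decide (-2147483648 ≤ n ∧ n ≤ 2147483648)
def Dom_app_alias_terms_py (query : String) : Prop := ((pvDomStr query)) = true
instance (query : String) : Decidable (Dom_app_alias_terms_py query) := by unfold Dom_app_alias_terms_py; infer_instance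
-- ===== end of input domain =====

-- B precomputes the complete final answer list for every alias key once, so the
-- call is a single table lookup with no group scan and no dedup loop (objective: alternative).

-- shared normalization t.strip().lower()
def pvNorm (s : String) : String := PySem.Str.lower (PySem.Str.strip s)

-- ===== PORT A =====
def pvGroupsA : List (String × List String) :=
  [("chrome", ["chrome", "google chrome", "chrome.exe"]),
   ("word", ["word", "microsoft word", "winword", "winword.exe"]),
   ("powerpoint", ["powerpoint", "microsoft powerpoint", "power point", "powerpnt", "powerpnt.exe"]),
   ("excel", ["excel", "microsoft excel", "excel.exe"])]

-- A's `for canonical, aliases … break` loop over the groups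
def pvLoopA (query : String) : List (String × List String) → List String → List String
  | [], terms => terms
  | (c, al) :: rest, terms =>
      if query == c || al.contains query then terms ++ al ++ [c]
      else pvLoopA query rest terms

def app_alias_terms_py (query : String) : List String :=
  let terms := pvLoopA query pvGroupsA [query]
  terms.foldl (fun acc t =>
    let t' := pvNorm t
    if t' != "" && !acc.contains t' then acc ++ [t'] else acc) []

-- ===== PORT B =====
def pvGroupsB : List (String × List String) :=
  [("chrome", ["chrome", "google chrome", "chrome.exe"]),
   ("word", ["word", "microsoft word", "winword", "winword.exe"]),
   ("powerpoint", ["powerpoint", "microsoft powerpoint", "power point", "powerpnt", "powerpnt.exe"]),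
   ("excel", ["excel", "microsoft excel", "excel.exe"])]

-- module-level precomputed answer table _ANSWER (dict comprehension)
def pvAnswerB : PySem.Dict String (List String) :=
  PySem.Dict.ofList
    (pvGroupsB.flatMap (fun g =>
      (g.2 ++ [g.1]).map (fun t => (t, PySem.List.dedup (t :: (g.2 ++ [g.1]))))))

def app_alias_terms_py_alt (query : String) : List String :=
  match pvAnswerB.get? query with
  | some hit => hit
  | none =>
      let q := pvNorm query
      if q != "" then [q] else []

-- ===== PRECONDITION & SPEC =====
def Spec_app_alias_terms_py (query : String) (out : List String) : Prop := out = app_alias_terms_py_alt query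
instance (query : String) (out : List String) : Decidable (Spec_app_alias_terms_py query out) := by unfold Spec_app_alias_terms_py; infer_instance

-- ===== CLAIM (what is proved, stated in full; the proofs are below) =====
def Claim_equal_app_alias_terms_py : Prop := ∀ (query : String), Dom_app_alias_terms_py query → Spec_app_alias_terms_py query (app_alias_terms_py query)

-- ===== LEMMAS AND PROOFS =====

-- the answer table, evaluated
theorem pvAnswerB_eval : pvAnswerB = PySem.Dict.mk
  [("chrome", ["chrome", "google chrome", "chrome.exe"]),
   ("google chrome", ["google chrome", "chrome", "chrome.exe"]),
   ("chrome.exe", ["chrome.exe", "chrome", "google chrome"]),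
   ("word", ["word", "microsoft word", "winword", "winword.exe"]),
   ("microsoft word", ["microsoft word", "word", "winword", "winword.exe"]),
   ("winword", ["winword", "word", "microsoft word", "winword.exe"]),
   ("winword.exe", ["winword.exe", "word", "microsoft word", "winword"]),
   ("powerpoint", ["powerpoint", "microsoft powerpoint", "power point", "powerpnt", "powerpnt.exe"]),
   ("microsoft powerpoint", ["microsoft powerpoint", "powerpoint", "power point", "powerpnt", "powerpnt.exe"]),
   ("power point", ["power point", "powerpoint", "microsoft powerpoint", "powerpnt", "powerpnt.exe"]),
   ("powerpnt", ["powerpnt", "powerpoint", "microsoft powerpoint", "power point", "powerpnt.exe"]),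
   ("powerpnt.exe", ["powerpnt.exe", "powerpoint", "microsoft powerpoint", "power point", "powerpnt"]),
   ("excel", ["excel", "microsoft excel", "excel.exe"]),
   ("microsoft excel", ["microsoft excel", "excel", "excel.exe"]),
   ("excel.exe", ["excel.exe", "excel", "microsoft excel"])] := by decide

-- ===== VERDICT (by name: the statement is the Claim_ definition above) =====
theorem app_alias_terms_py_spec : Claim_equal_app_alias_terms_py := by
  intro q _
  unfold Spec_app_alias_terms_py
  by_cases h1 : q = "chrome"; · subst h1; decide
  by_cases h2 : q = "google chrome"; · subst h2; decide
  by_cases h3 : q = "chrome.exe"; · subst h3; decide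
  by_cases h4 : q = "word"; · subst h4; decide
  by_cases h5 : q = "microsoft word"; · subst h5; decide
  by_cases h6 : q = "winword"; · subst h6; decide
  by_cases h7 : q = "winword.exe"; · subst h7; decide
  by_cases h8 : q = "powerpoint"; · subst h8; decide
  by_cases h9 : q = "microsoft powerpoint"; · subst h9; decide
  by_cases h10 : q = "power point"; · subst h10; decide
  by_cases h11 : q = "powerpnt"; · subst h11; decide
  by_cases h12 : q = "powerpnt.exe"; · subst h12; decide
  by_cases h13 : q = "excel"; · subst h13; decide
  by_cases h14 : q = "microsoft excel"; · subst h14; decide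
  by_cases h15 : q = "excel.exe"; · subst h15; decide
  -- unmatched query: A's loop keeps terms = [q]; B misses the table
  have hget : pvAnswerB.get? q = none := by
    rw [pvAnswerB_eval]
    simp [PySem.Dict.get?,
      Ne.symm h1, Ne.symm h2, Ne.symm h3, Ne.symm h4, Ne.symm h5, Ne.symm h6,
      Ne.symm h7, Ne.symm h8, Ne.symm h9, Ne.symm h10, Ne.symm h11, Ne.symm h12,
      Ne.symm h13, Ne.symm h14, Ne.symm h15]
  have hloop : pvLoopA q pvGroupsA [q] = [q] := by
    simp [pvGroupsA, pvLoopA, h1, h2, h3, h4, h5, h6, h7, h8, h9, h10,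
      h11, h12, h13, h14, h15]
  unfold app_alias_terms_py app_alias_terms_py_alt
  rw [hloop, hget]
  simp only [List.foldl_cons, List.foldl_nil, List.contains_nil, Bool.not_false, Bool.and_true]
  by_cases he : pvNorm q = ""
  · simp [he]
  · simp [bne_iff_ne.mpr he]
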